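-- pv_equiv track=rewrite | github.com/qnano/CLEAR-IT | clearit/shap/importance.py | _find_nucleus_idx
-- ===== SOURCE A (Python) =====
-- from typing import Optional, List
--
-- def _norm(s: str) -> str:
--     return "".join(ch for ch in str(s) if ch.isalnum()).lower()
--
-- def _find_nucleus_idx(channel_names: Optional[List[str]]) -> Optional[int]:
--     """Prefer dsDNA (MIBI) if present; else DAPI (MxIF); else None."""
--     if not channel_names:
--         return None
--     idx = { _norm(n): i for i, n in enumerate(channel_names) }
--     for key in ("dsdna", "dna", "intercalator"):  # MIBI-like
--         if key in idx:
--             return idx[key]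
--     for key in ("dapi",):                          # MxIF-like
--         if key in idx:
--             return idx[key]
--     return None
-- ===== SOURCE B (Python) =====
-- from typing import Optional, List
--
-- def _norm(s: str) -> str:
--     return "".join(ch for ch in str(s) if ch.isalnum()).lower()
--
-- _PRIORITY = {"dsdna": 0, "dna": 1, "intercalator": 2, "dapi": 3}
--
-- def _find_nucleus_idx(channel_names: Optional[List[str]]) -> Optional[int]:
--     """Prefer dsDNA (MIBI) if present; else DAPI (MxIF); else None."""
--     if not channel_names:
--         return None
--     best = None  # (rank, index); smaller rank wins, later index wins ties
--     for i, name in enumerate(channel_names):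
--         rank = _PRIORITY.get(_norm(name))
--         if rank is not None and (best is None or rank <= best[0]):
--             best = (rank, i)
--     return None if best is None else best[1]
-- ===== Notes on version B (the rewrite author's own statement) =====
-- stated objective: alternative
-- what changed: Replaces the name-to-index dict plus staged per-key lookups with a single pass keeping a best (rank, index) accumulator from a fixed priority table, where smaller rank wins and a later index wins ties.
import Mathlib
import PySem

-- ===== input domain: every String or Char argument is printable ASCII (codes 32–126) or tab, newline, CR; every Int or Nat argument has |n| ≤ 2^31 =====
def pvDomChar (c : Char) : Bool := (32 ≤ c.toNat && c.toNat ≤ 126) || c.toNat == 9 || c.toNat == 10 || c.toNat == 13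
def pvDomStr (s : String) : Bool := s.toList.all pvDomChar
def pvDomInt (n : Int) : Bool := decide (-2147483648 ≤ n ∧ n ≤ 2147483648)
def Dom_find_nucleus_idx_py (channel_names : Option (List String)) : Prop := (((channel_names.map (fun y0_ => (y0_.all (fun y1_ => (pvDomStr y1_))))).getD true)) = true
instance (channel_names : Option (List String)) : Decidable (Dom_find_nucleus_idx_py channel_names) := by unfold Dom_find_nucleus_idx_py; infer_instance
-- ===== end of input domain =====

-- B replaces A's name→index dict plus staged key lookups by a single pass keeping a best (rank, index) accumulator; same result.

-- ===== PORT A =====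
-- _norm: keep alphanumeric characters, lowercase (shared by both Pythons)
def pvNorm (s : String) : String :=
  PySem.Str.lower (String.ofList (s.toList.filter (fun c => PySem.Chars.isalnum c)))

def find_nucleus_idx_py (channel_names : Option (List String)) : Option Int :=
  match channel_names with
  | none => none
  | some l =>
    if l = [] then none
    else
      let idx : PySem.Dict String Int :=
        (PySem.List.enumerate l 0).foldl (fun d p => d.insert (pvNorm p.2) p.1) PySem.Dict.empty
      match idx.get? "dsdna" with
      | some i => some i
      | none =>
        match idx.get? "dna" with
        | some i => some i
        | none =>
          match idx.get? "intercalator" with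
          | some i => some i
          | none =>
            match idx.get? "dapi" with
            | some i => some i
            | none => none

-- ===== PORT B =====
-- the _PRIORITY dict of Source B
def pvPriority : PySem.Dict String Int :=
  ((PySem.Dict.empty.insert "dsdna" 0).insert "dna" 1 |>.insert "intercalator" 2 |>.insert "dapi" 3)

-- one iteration of Source B's loop body
def pvStep (best : Option (Int × Int)) (p : Int × String) : Option (Int × Int) :=
  match pvPriority.get? (pvNorm p.2) with
  | none => best
  | some r =>
    match best with
    | none => some (r, p.1)
    | some b => if r ≤ b.1 then some (r, p.1) else best

def find_nucleus_idx_py_alt (channel_names : Option (List String)) : Option Int :=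
  match channel_names with
  | none => none
  | some l =>
    if l = [] then none
    else
      match (PySem.List.enumerate l 0).foldl pvStep none with
      | none => none
      | some b => some b.2

-- ===== PRECONDITION & SPEC =====
def Spec_find_nucleus_idx_py (channel_names : Option (List String)) (out : Option Int) : Prop := out = find_nucleus_idx_py_alt channel_names
instance (channel_names : Option (List String)) (out : Option Int) : Decidable (Spec_find_nucleus_idx_py channel_names out) := by unfold Spec_find_nucleus_idx_py; infer_instance

-- ===== CLAIM (what is proved, stated in full; the proofs are below) =====
def Claim_equal_find_nucleus_idx_py : Prop := ∀ (channel_names : Option (List String)), Dom_find_nucleus_idx_py channel_names → Spec_find_nucleus_idx_py channel_names (find_nucleus_idx_py channel_names)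

-- ===== LEMMAS AND PROOFS =====

-- last index in ps whose normalized name equals k (what A's dict stores at key k)
def pvLast (k : String) (ps : List (Int × String)) : Option Int :=
  ps.foldl (fun acc p => if pvNorm p.2 == k then some p.1 else acc) none

-- a lookup in the dict built by A's insert loop is the last-match fold
theorem pv_get?_foldl_insert (ps : List (Int × String)) (d : PySem.Dict String Int) (k : String) :
    (ps.foldl (fun d p => d.insert (pvNorm p.2) p.1) d).get? k
      = ps.foldl (fun acc p => if pvNorm p.2 == k then some p.1 else acc) (d.get? k) := by
  induction ps generalizing d with
  | nil => rfl
  | cons p ps ih =>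
    simp only [List.foldl]
    rw [ih]
    by_cases h : pvNorm p.2 = k
    · simp [h, PySem.Dict.get?_insert_self]
    · simp [PySem.Dict.get?_insert_of_ne _ _ (Ne.symm h), h]

-- the value B's accumulator converges to, expressed through the four last-match folds
def pvBestSpec (ps : List (Int × String)) : Option (Int × Int) :=
  match pvLast "dsdna" ps with
  | some i => some (0, i)
  | none =>
    match pvLast "dna" ps with
    | some i => some (1, i)
    | none =>
      match pvLast "intercalator" ps with
      | some i => some (2, i)
      | none =>
        match pvLast "dapi" ps with
        | some i => some (3, i)
        | none => none

theorem pvLast_append (k : String) (ps : List (Int × String)) (p : Int × String) :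
    pvLast k (ps ++ [p]) = if pvNorm p.2 == k then some p.1 else pvLast k ps := by
  simp [pvLast, List.foldl_append]

theorem pvPriority_dsdna : pvPriority.get? "dsdna" = some 0 := by decide
theorem pvPriority_dna : pvPriority.get? "dna" = some 1 := by decide
theorem pvPriority_inter : pvPriority.get? "intercalator" = some 2 := by decide
theorem pvPriority_dapi : pvPriority.get? "dapi" = some 3 := by decide

theorem pv_foldl_step_eq_bestSpec (ps : List (Int × String)) :
    ps.foldl pvStep none = pvBestSpec ps := by
  induction ps using List.reverseRecOn with
  | nil => rfl
  | append_singleton ps p ih =>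
    rw [List.foldl_append, ih]
    simp only [List.foldl]
    by_cases h0 : pvNorm p.2 = "dsdna"
    · cases hA : pvLast "dsdna" ps <;> cases hB : pvLast "dna" ps <;>
        cases hC : pvLast "intercalator" ps <;> cases hD : pvLast "dapi" ps <;>
        simp [pvBestSpec, pvLast_append, pvStep, h0, pvPriority_dsdna, hA, hB, hC, hD, beq_iff_eq]
    · by_cases h1 : pvNorm p.2 = "dna"
      · cases hA : pvLast "dsdna" ps <;> cases hB : pvLast "dna" ps <;>
          cases hC : pvLast "intercalator" ps <;> cases hD : pvLast "dapi" ps <;>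
          simp [pvBestSpec, pvLast_append, pvStep, h0, h1, pvPriority_dna, hA, hB, hC, hD, beq_iff_eq]
      · by_cases h2 : pvNorm p.2 = "intercalator"
        · cases hA : pvLast "dsdna" ps <;> cases hB : pvLast "dna" ps <;>
            cases hC : pvLast "intercalator" ps <;> cases hD : pvLast "dapi" ps <;>
            simp [pvBestSpec, pvLast_append, pvStep, h0, h1, h2, pvPriority_inter, hA, hB, hC, hD, beq_iff_eq]
        · by_cases h3 : pvNorm p.2 = "dapi"
          · cases hA : pvLast "dsdna" ps <;> cases hB : pvLast "dna" ps <;>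
              cases hC : pvLast "intercalator" ps <;> cases hD : pvLast "dapi" ps <;>
              simp [pvBestSpec, pvLast_append, pvStep, h0, h1, h2, h3, pvPriority_dapi, hA, hB, hC, hD, beq_iff_eq]
          · have hnone : pvPriority.get? (pvNorm p.2) = none := by
              simp [pvPriority, PySem.Dict.get?, PySem.Dict.insert, PySem.Dict.empty]
              exact ⟨fun h => h0 h.symm, fun h => h1 h.symm, fun h => h2 h.symm, fun h => h3 h.symm⟩
            simp [pvBestSpec, pvLast_append, pvStep, hnone, h0, h1, h2, h3, beq_iff_eq]

-- ===== VERDICT (by name: the statement is the Claim_ definition above) =====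
theorem find_nucleus_idx_py_spec : Claim_equal_find_nucleus_idx_py := by
  intro channel_names _
  unfold Spec_find_nucleus_idx_py find_nucleus_idx_py find_nucleus_idx_py_alt
  cases channel_names with
  | none => rfl
  | some l =>
    by_cases hl : l = []
    · simp [hl]
    · simp only [hl, if_false, pv_foldl_step_eq_bestSpec]
      have hd : ∀ k, ((PySem.List.enumerate l 0).foldl (fun d p => d.insert (pvNorm p.2) p.1)
          (PySem.Dict.empty : PySem.Dict String Int)).get? k = pvLast k (PySem.List.enumerate l 0) := by
        intro k; rw [pv_get?_foldl_insert]; rfl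
      simp only [hd]
      cases hA : pvLast "dsdna" (PySem.List.enumerate l 0) <;>
        cases hB : pvLast "dna" (PySem.List.enumerate l 0) <;>
        cases hC : pvLast "intercalator" (PySem.List.enumerate l 0) <;>
        cases hD : pvLast "dapi" (PySem.List.enumerate l 0) <;>
        simp [pvBestSpec, hA, hB, hC, hD]
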